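-- pv_equiv track=rewrite | github.com/rimaz04/Intertwined_lattice_sem_project | topology2.py | all_unique_sequences
-- ===== SOURCE A (Python) =====
-- from itertools import chain, combinations, permutations, combinations_with_replacement, product
--
-- def all_unique_sequences(elements, min_length=2, max_length=None):
--         """
--         Compute all possible sequences (ordered arrangements) of subsets of the given set,
--         treating a sequence and its reverse as the same.
--
--         Args:
--             elements: A set of elements.
--
--         Returns:
--             A list of tuples, where each tuple represents a unique sequence (order matters, but reverses are treated as the same).
--         """
--         elements = list(elements)  # Convert to list for indexing
--         sequences = set()  # Use a set to store unique sequences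
--         if max_length is None:
--             max_length = len(elements)
--
--         # Generate all subsets, excluding the empty set
--         for subset_size in range(min_length, max_length + 1):
--         # for subset_size in [2,4,6]:
--             for subset in combinations(elements, subset_size):
--             # Generate all permutations of the current subset
--                 for perm in permutations(subset):
--                     # Always store the lexicographically smaller of (perm, perm[::-1])
--                     sequences.add(min(perm, perm[::-1]))
--
--         return sorted(sequences, key=lambda x: (len(x), x))  # Sort by length first, then lexicographically
-- ===== SOURCE B (Python) =====
-- def all_unique_sequences(elements, min_length=2, max_length=None):
--     """Breadth-first frontier expansion: grow partial sequences one element at a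
--     time (each frontier entry carries the sequence built so far and the elements
--     still unused), collecting reverse-canonical forms at every admissible length."""
--     elements = list(elements)
--     n = len(elements)
--     if max_length is None:
--         max_length = n
--     limit = min(max_length, n)
--     if limit < min_length:  # no reachable length is admissible
--         return []
--     sequences = set()
--     frontier = [((), tuple(elements))]
--     length = 0
--     while True:
--         if min_length <= length <= max_length:
--             for seq, _rest in frontier:
--                 sequences.add(min(seq, seq[::-1]))
--         if length >= limit:
--             break
--         nxt = []
--         for seq, rest in frontier:
--             for j in range(len(rest)):
--                 nxt.append((seq + (rest[j],), rest[:j] + rest[j + 1:]))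
--         frontier = nxt
--         length += 1
--     return sorted(sequences, key=lambda x: (len(x), x))
-- ===== Notes on version B (the rewrite author's own statement) =====
-- stated objective: alternative
-- what changed: B drops itertools entirely and replaces A's subset-then-permute double enumeration by an iterative breadth-first frontier expansion: it grows partial sequences one element at a time, each frontier entry carrying the sequence built so far and the still-unused elements, collecting the reverse-canonical form at every admissible length; same set contents and final (len, lex) sort.
import Mathlib
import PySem

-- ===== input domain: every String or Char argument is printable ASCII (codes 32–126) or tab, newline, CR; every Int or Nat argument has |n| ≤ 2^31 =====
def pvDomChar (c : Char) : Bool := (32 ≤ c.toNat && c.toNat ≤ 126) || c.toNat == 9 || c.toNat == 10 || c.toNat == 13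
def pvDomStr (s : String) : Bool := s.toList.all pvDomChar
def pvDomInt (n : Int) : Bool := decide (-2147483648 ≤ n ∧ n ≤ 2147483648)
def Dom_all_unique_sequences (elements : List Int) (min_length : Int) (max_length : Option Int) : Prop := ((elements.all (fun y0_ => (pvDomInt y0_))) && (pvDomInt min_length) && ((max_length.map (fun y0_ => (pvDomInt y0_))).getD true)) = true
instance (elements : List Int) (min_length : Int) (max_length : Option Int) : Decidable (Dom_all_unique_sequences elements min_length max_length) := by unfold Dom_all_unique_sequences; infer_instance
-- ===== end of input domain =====

-- B replaces A's itertools subset-then-permute enumeration by an iterative breadth-first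
-- frontier expansion over (partial sequence, unused elements) pairs; same result set and sort.

-- ===== PORT A =====
-- min(perm, perm[::-1]) : Python min of two tuples (List Int `<` is that lexicographic order)
def pvCanon (p : List Int) : List Int := if p.reverse < p then p.reverse else p

def all_unique_sequences (elements : List Int) (min_length : Int) (max_length : Option Int) : List (List Int) :=
  let maxL : Int := match max_length with
    | none => (elements.length : Int)
    | some m => m
  let sequences : PySem.Set (List Int) :=
    (PySem.List.pyRange min_length (maxL + 1)).foldl (fun seqs sz =>
      (PySem.List.combinations elements sz.toNat).foldl (fun seqs subset =>
        (PySem.List.permutations subset subset.length).foldl (fun seqs perm =>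
          PySem.Set.add seqs (pvCanon perm)) seqs) seqs) PySem.Set.empty
  PySem.List.sorted2 sequences (fun x => (x.length : Int)) (fun x => x)

-- ===== PORT B =====
-- one frontier-expansion step: every partial sequence extended by each still-unused element
def pvStep (fr : List (List Int × List Int)) : List (List Int × List Int) :=
  fr.foldl (fun nxt pr =>
    (List.range pr.2.length).foldl (fun nxt j =>
      nxt ++ [(pr.1 ++ [pr.2.getD j 0], pr.2.eraseIdx j)]) nxt) []

-- the while-loop of Source B (fuel = number of expansions left, i.e. limit - length):
-- collect canonical forms at each admissible length, then expand the frontier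
def pvLoop (minL maxL : Int) (fuel : Nat) (len : Int) (fr : List (List Int × List Int))
    (seqs : PySem.Set (List Int)) : PySem.Set (List Int) :=
  let seqs' := if minL ≤ len ∧ len ≤ maxL then
      fr.foldl (fun s pr => PySem.Set.add s (pvCanon pr.1)) seqs
    else seqs
  match fuel with
  | 0 => seqs'
  | Nat.succ fuel' => pvLoop minL maxL fuel' (len + 1) (pvStep fr) seqs'

def all_unique_sequences_alt (elements : List Int) (min_length : Int) (max_length : Option Int) : List (List Int) :=
  let n : Int := (elements.length : Int)
  let maxL : Int := match max_length with
    | none => n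
    | some m => m
  let limit : Int := min maxL n
  if limit < min_length then []  -- no reachable length is admissible
  else
    let sequences := pvLoop min_length maxL limit.toNat 0 [(([] : List Int), elements)] PySem.Set.empty
    PySem.List.sorted2 sequences (fun x => (x.length : Int)) (fun x => x)

-- ===== PRECONDITION & SPEC =====
-- Pre_ excludes exactly the inputs where the Python A raises ValueError: a negative subset
-- size reaches itertools.combinations, i.e. min_length < 0 while the size range
-- range(min_length, max_eff + 1) is nonempty.  (B's Python returns normally there.)
def Pre_all_unique_sequences (elements : List Int) (min_length : Int) (max_length : Option Int) : Prop :=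
  0 ≤ min_length ∨ (max_length.getD (elements.length : Int)) < min_length
instance (elements : List Int) (min_length : Int) (max_length : Option Int) : Decidable (Pre_all_unique_sequences elements min_length max_length) := by unfold Pre_all_unique_sequences; infer_instance

def pvWitness_all_unique_sequences : List Int × Int × Option Int := ([1, 2, 3], 2, none)

def Spec_all_unique_sequences (elements : List Int) (min_length : Int) (max_length : Option Int) (out : List (List Int)) : Prop := out = all_unique_sequences_alt elements min_length max_length
instance (elements : List Int) (min_length : Int) (max_length : Option Int) (out : List (List Int)) : Decidable (Spec_all_unique_sequences elements min_length max_length out) := by unfold Spec_all_unique_sequences; infer_instance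

-- ===== CLAIM (what is proved, stated in full; the proofs are below) =====
def Claim_equal_all_unique_sequences : Prop := ∀ (elements : List Int) (min_length : Int) (max_length : Option Int), Dom_all_unique_sequences elements min_length max_length → Pre_all_unique_sequences elements min_length max_length → Spec_all_unique_sequences elements min_length max_length (all_unique_sequences elements min_length max_length)

-- ===== LEMMAS AND PROOFS =====

-- an element of xs pulled to the front is a permutation of xs
theorem pv_perm_eraseIdx (xs : List Int) (i : Nat) (h : i < xs.length) :
    (xs[i] :: xs.eraseIdx i).Perm xs := by
  conv_rhs => rw [← List.take_append_drop i xs, List.drop_eq_getElem_cons h]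
  rw [List.eraseIdx_eq_take_drop_succ]
  exact List.perm_middle.symm

-- membership in itertools.permutations(xs, r): the length-r subpermutations of xs
theorem pv_mem_permutations {xs p : List Int} {r : Nat} :
    p ∈ PySem.List.permutations xs r ↔ p.length = r ∧ p.Subperm xs := by
  induction r generalizing xs p with
  | zero =>
    simp [PySem.List.permutations_zero, List.length_eq_zero_iff]
    rintro rfl; exact List.nil_subperm
  | succ r ih =>
    constructor
    · intro hmem
      simp only [PySem.List.permutations, List.mem_flatMap, List.mem_range] at hmem
      obtain ⟨i, hi, hmem⟩ := hmem
      rw [List.getElem?_eq_getElem hi] at hmem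
      simp only [List.mem_map] at hmem
      obtain ⟨q, hq, rfl⟩ := hmem
      obtain ⟨hlen, hsub⟩ := ih.mp hq
      refine ⟨by simp [hlen], ?_⟩
      exact ((List.subperm_cons xs[i]).mpr hsub).trans (pv_perm_eraseIdx xs i hi).subperm
    · rintro ⟨hlen, hsub⟩
      match p, hlen with
      | y :: q, hlen =>
        have hy : y ∈ xs := hsub.subset List.mem_cons_self
        obtain ⟨i, hi, rfl⟩ := List.mem_iff_getElem.mp hy
        simp only [PySem.List.permutations, List.mem_flatMap, List.mem_range]
        refine ⟨i, hi, ?_⟩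
        rw [List.getElem?_eq_getElem hi]
        simp only [List.mem_map]
        refine ⟨q, ih.mpr ⟨by simpa using hlen, ?_⟩, rfl⟩
        have := hsub.trans ((pv_perm_eraseIdx xs i hi).symm).subperm
        exact (List.subperm_cons xs[i]).mp this

theorem pv_update_append (s : PySem.Set (List Int)) (a b : List (List Int)) :
    PySem.Set.update s (a ++ b) = PySem.Set.update (PySem.Set.update s a) b := by
  simp [PySem.Set.update, List.foldl_append]

theorem pv_foldl_update {β : Type} (l : List β) (h : β → List (List Int)) (s : PySem.Set (List Int)) :
    l.foldl (fun s c => PySem.Set.update s (h c)) s = PySem.Set.update s (l.flatMap h) := by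
  induction l generalizing s with
  | nil => simp [PySem.Set.update]
  | cons a l ih => simp [List.foldl_cons, ih, pv_update_append]

-- A's set-building triple loop, flattened to one Set.update
theorem pv_setA_eq (xs : List Int) (sizes : List Int) :
    sizes.foldl (fun seqs sz =>
      (PySem.List.combinations xs sz.toNat).foldl (fun seqs subset =>
        (PySem.List.permutations subset subset.length).foldl (fun seqs perm =>
          PySem.Set.add seqs (pvCanon perm)) seqs) seqs) PySem.Set.empty
    = PySem.Set.update PySem.Set.empty (sizes.flatMap (fun sz =>
        (PySem.List.combinations xs sz.toNat).flatMap (fun c =>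
          (PySem.List.permutations c c.length).map pvCanon))) := by
  simp only [← PySem.Set.update_map_eq_foldl_add, pv_foldl_update]

-- per size: permutations of each r-combination and direct r-permutations give the same canonical forms
theorem pv_memAB (xs : List Int) (r : Nat) (y : List Int) :
    (∃ c ∈ PySem.List.combinations xs r, y ∈ (PySem.List.permutations c c.length).map pvCanon)
      ↔ y ∈ (PySem.List.permutations xs r).map pvCanon := by
  simp only [List.mem_map, PySem.List.mem_combinations_iff, pv_mem_permutations]
  constructor
  · rintro ⟨c, ⟨hcs, hcl⟩, p, ⟨hpl, hps⟩, rfl⟩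
    exact ⟨p, ⟨hpl.trans hcl, hps.trans hcs.subperm⟩, rfl⟩
  · rintro ⟨p, ⟨hpl, hps⟩, rfl⟩
    obtain ⟨c, hcp, hcs⟩ := hps
    refine ⟨c, ⟨hcs, hcp.length_eq.trans hpl⟩, p, ⟨hcp.length_eq.symm, hcp.symm.subperm⟩, rfl⟩

-- B's step as a flatMap
theorem pv_step_eq (fr : List (List Int × List Int)) :
    pvStep fr = fr.flatMap (fun pr => (List.range pr.2.length).map
      (fun j => (pr.1 ++ [pr.2.getD j 0], pr.2.eraseIdx j))) := by
  have inner : ∀ (pr : List Int × List Int) (acc : List (List Int × List Int)),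
      (List.range pr.2.length).foldl (fun nxt j =>
        nxt ++ [(pr.1 ++ [pr.2.getD j 0], pr.2.eraseIdx j)]) acc
      = acc ++ (List.range pr.2.length).map
          (fun j => (pr.1 ++ [pr.2.getD j 0], pr.2.eraseIdx j)) := by
    intro pr acc
    induction (List.range pr.2.length) generalizing acc with
    | nil => simp
    | cons a l ih =>
      simp only [List.foldl_cons, List.map_cons]
      rw [ih, List.append_assoc, List.singleton_append]
  show fr.foldl _ [] = _
  have gen : ∀ acc, fr.foldl (fun nxt pr =>
      (List.range pr.2.length).foldl (fun nxt j =>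
        nxt ++ [(pr.1 ++ [pr.2.getD j 0], pr.2.eraseIdx j)]) nxt) acc
      = acc ++ fr.flatMap (fun pr => (List.range pr.2.length).map
          (fun j => (pr.1 ++ [pr.2.getD j 0], pr.2.eraseIdx j))) := by
    induction fr with
    | nil => simp
    | cons p l ih =>
      intro acc
      simp only [List.foldl_cons, List.flatMap_cons]
      rw [inner, ih, List.append_assoc]
  simpa using gen []

theorem pv_mem_step {fr : List (List Int × List Int)} {q : List Int × List Int} :
    q ∈ pvStep fr ↔ ∃ pr ∈ fr, ∃ j, ∃ h : j < pr.2.length,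
      q = (pr.1 ++ [pr.2[j]], pr.2.eraseIdx j) := by
  simp only [pv_step_eq, List.mem_flatMap, List.mem_map, List.mem_range]
  constructor
  · rintro ⟨pr, hpr, j, hj, rfl⟩
    exact ⟨pr, hpr, j, hj, by rw [List.getD_eq_getElem _ _ hj]⟩
  · rintro ⟨pr, hpr, j, hj, rfl⟩
    exact ⟨pr, hpr, j, hj, by rw [List.getD_eq_getElem _ _ hj]⟩

-- frontier invariant, forward: every entry is a length-k partial permutation with its complement
theorem pv_frontier_sound (elements : List Int) (k : Nat) :
    ∀ pr ∈ pvStep^[k] [(([] : List Int), elements)],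
      pr.1.length = k ∧ (pr.1 ++ pr.2).Perm elements := by
  induction k with
  | zero => intro pr hpr; simp at hpr; simp [hpr]
  | succ k ih =>
    intro pr hpr
    rw [Function.iterate_succ_apply'] at hpr
    obtain ⟨pq, hpq, j, hj, rfl⟩ := pv_mem_step.mp hpr
    obtain ⟨hlen, hperm⟩ := ih pq hpq
    constructor
    · simp [hlen]
    · have h1 : (pq.2[j] :: pq.2.eraseIdx j).Perm pq.2 := pv_perm_eraseIdx pq.2 j hj
      have h2 : (pq.1 ++ [pq.2[j]] ++ pq.2.eraseIdx j).Perm (pq.1 ++ pq.2) := by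
        rw [List.append_assoc, List.singleton_append]
        exact List.Perm.append_left pq.1 h1
      exact h2.trans hperm

-- frontier invariant, complete: every length-k subpermutation occurs as a first component
theorem pv_frontier_complete (elements : List Int) (k : Nat) :
    ∀ p : List Int, p.length = k → p.Subperm elements →
      ∃ rest, (p, rest) ∈ pvStep^[k] [(([] : List Int), elements)] := by
  induction k with
  | zero =>
    intro p hlen _
    rw [List.length_eq_zero_iff] at hlen
    exact ⟨elements, by simp [hlen]⟩
  | succ k ih =>
    intro p hlen hsub
    have hne : p ≠ [] := by intro h; rw [h] at hlen; simp at hlen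
    obtain ⟨q, a, rfl⟩ : ∃ q a, p = q ++ [a] :=
      ⟨p.dropLast, p.getLast hne, (List.dropLast_append_getLast hne).symm⟩
    have hqlen : q.length = k := by simpa using hlen
    have hqsub : q.Subperm elements := (List.sublist_append_left q [a]).subperm.trans hsub
    obtain ⟨rest, hmem⟩ := ih q hqlen hqsub
    have hperm := (pv_frontier_sound elements k _ hmem).2
    -- a occurs in rest, by counting
    have hcount : 1 ≤ rest.count a := by
      have h1 : (q ++ [a]).count a ≤ elements.count a := hsub.count_le a
      have h2 : elements.count a = (q ++ rest).count a := (hperm.count_eq a).symm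
      simp [List.count_append] at h1 h2
      omega
    have hamem : a ∈ rest := List.count_pos_iff.mp (by omega)
    obtain ⟨j, hj, rfl⟩ := List.mem_iff_getElem.mp hamem
    refine ⟨rest.eraseIdx j, ?_⟩
    rw [Function.iterate_succ_apply']
    exact pv_mem_step.mpr ⟨(q, rest), hmem, j, hj, rfl⟩

-- membership in the canonical image of the level-k frontier
theorem pv_frontier_mem (elements : List Int) (k : Nat) (y : List Int) :
    (∃ pr ∈ pvStep^[k] [(([] : List Int), elements)], y = pvCanon pr.1)
      ↔ ∃ p : List Int, p.length = k ∧ p.Subperm elements ∧ y = pvCanon p := by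
  constructor
  · rintro ⟨pr, hpr, rfl⟩
    obtain ⟨hlen, hperm⟩ := pv_frontier_sound elements k pr hpr
    exact ⟨pr.1, hlen, (pr.1.sublist_append_left pr.2).subperm.trans hperm.subperm, rfl⟩
  · rintro ⟨p, hlen, hsub, rfl⟩
    obtain ⟨rest, hmem⟩ := pv_frontier_complete elements k p hlen hsub
    exact ⟨(p, rest), hmem, rfl⟩

-- the level-collection inner loop is a Set.update
theorem pv_collect_eq (fr : List (List Int × List Int)) (s : PySem.Set (List Int)) :
    fr.foldl (fun s pr => PySem.Set.add s (pvCanon pr.1)) s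
      = PySem.Set.update s (fr.map (fun pr => pvCanon pr.1)) := by
  rw [PySem.Set.update_map_eq_foldl_add]

-- membership through the per-level collection step
theorem pv_mem_condAdd (minL maxL len : Int) (fr : List (List Int × List Int))
    (s : PySem.Set (List Int)) (y : List Int) :
    (y ∈ (if minL ≤ len ∧ len ≤ maxL then
        fr.foldl (fun s pr => PySem.Set.add s (pvCanon pr.1)) s else s)) ↔
      (y ∈ s ∨ (minL ≤ len ∧ len ≤ maxL ∧ ∃ pr ∈ fr, y = pvCanon pr.1)) := by
  split
  · next hc =>
    rw [pv_collect_eq, PySem.Set.mem_update]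
    simp only [List.mem_map]
    constructor
    · rintro (h | ⟨pr, hpr, rfl⟩)
      · exact Or.inl h
      · exact Or.inr ⟨hc.1, hc.2, pr, hpr, rfl⟩
    · rintro (h | ⟨_, _, pr, hpr, rfl⟩)
      · exact Or.inl h
      · exact Or.inr ⟨pr, hpr, rfl⟩
  · next hc =>
    constructor
    · exact Or.inl
    · rintro (h | ⟨h1, h2, _⟩)
      · exact h
      · exact absurd ⟨h1, h2⟩ hc

-- full membership characterisation of B's while loop
theorem pv_mem_pvLoop (minL maxL : Int) (y : List Int) :
    ∀ (fuel : Nat) (len : Int) (fr : List (List Int × List Int)) (seqs : PySem.Set (List Int)),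
      (y ∈ pvLoop minL maxL fuel len fr seqs ↔ y ∈ seqs ∨
        ∃ j : Nat, j ≤ fuel ∧ minL ≤ len + (j : Int) ∧ len + (j : Int) ≤ maxL ∧
          ∃ pr ∈ pvStep^[j] fr, y = pvCanon pr.1) := by
  intro fuel
  induction fuel with
  | zero =>
    intro len fr seqs
    show (y ∈ (if minL ≤ len ∧ len ≤ maxL then _ else seqs)) ↔ _
    rw [pv_mem_condAdd]
    constructor
    · rintro (h | ⟨h1, h2, pr, hpr, rfl⟩)
      · exact Or.inl h
      · exact Or.inr ⟨0, le_refl 0, by simpa using h1, by simpa using h2, pr, by simpa using hpr, rfl⟩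
    · rintro (h | ⟨j, hj, h1, h2, pr, hpr, rfl⟩)
      · exact Or.inl h
      · have hj0 : j = 0 := Nat.le_zero.mp hj
        subst hj0
        exact Or.inr ⟨by simpa using h1, by simpa using h2, pr, by simpa using hpr, rfl⟩
  | succ fuel ih =>
    intro len fr seqs
    show (y ∈ pvLoop minL maxL fuel (len + 1) (pvStep fr)
          (if minL ≤ len ∧ len ≤ maxL then _ else seqs)) ↔ _
    rw [ih, pv_mem_condAdd]
    constructor
    · rintro ((h | ⟨h1, h2, pr, hpr, rfl⟩) | ⟨j, hj, h1, h2, pr, hpr, rfl⟩)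
      · exact Or.inl h
      · exact Or.inr ⟨0, Nat.zero_le _, by simpa using h1, by simpa using h2, pr, by simpa using hpr, rfl⟩
      · refine Or.inr ⟨j + 1, by omega, by push_cast at h1 ⊢; omega,
          by push_cast at h2 ⊢; omega, pr, ?_, rfl⟩
        rwa [Function.iterate_succ_apply]
    · rintro (h | ⟨j, hj, h1, h2, pr, hpr, rfl⟩)
      · exact Or.inl (Or.inl h)
      · cases j with
        | zero =>
          exact Or.inl (Or.inr ⟨by simpa using h1, by simpa using h2, pr, by simpa using hpr, rfl⟩)
        | succ j =>
          refine Or.inr ⟨j, by omega, by push_cast at h1 ⊢; omega,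
            by push_cast at h2 ⊢; omega, pr, ?_, rfl⟩
          rwa [Function.iterate_succ_apply] at hpr

-- B's loop preserves Nodup of the accumulated set
theorem pv_nodup_pvLoop (minL maxL : Int) :
    ∀ (fuel : Nat) (len : Int) (fr : List (List Int × List Int)) (seqs : PySem.Set (List Int)),
      seqs.Nodup → (pvLoop minL maxL fuel len fr seqs).Nodup := by
  intro fuel
  have hstep : ∀ (len : Int) (fr : List (List Int × List Int)) (seqs : PySem.Set (List Int)),
      seqs.Nodup → (if minL ≤ len ∧ len ≤ maxL then
        fr.foldl (fun s pr => PySem.Set.add s (pvCanon pr.1)) seqs else seqs).Nodup := by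
    intro len fr seqs hnd
    split
    · rw [pv_collect_eq]; exact PySem.Set.nodup_update _ _ hnd
    · exact hnd
  induction fuel with
  | zero =>
    intro len fr seqs hnd
    exact hstep len fr seqs hnd
  | succ fuel ih =>
    intro len fr seqs hnd
    exact ih (len + 1) (pvStep fr) _ (hstep len fr seqs hnd)

-- the strict order of the final sort: key (len(x), x), lexicographic
def pvBf (a b : List Int) : Bool :=
  decide ((a.length : Int) < (b.length : Int)) || (!decide ((b.length : Int) < (a.length : Int)) && decide (a < b))

theorem pvBf_iff {a b : List Int} : pvBf a b = true ↔ (a.length < b.length ∨ (a.length = b.length ∧ a < b)) := by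
  simp only [pvBf, Bool.or_eq_true, Bool.and_eq_true, Bool.not_eq_true', decide_eq_true_eq, decide_eq_false_iff_not]
  constructor
  · rintro (h | ⟨h1, h2⟩)
    · left; exact_mod_cast h
    · rcases lt_or_eq_of_le (not_lt.mp h1) with h | h
      · left; exact_mod_cast h
      · right; exact ⟨by exact_mod_cast h, h2⟩
  · rintro (h | ⟨h1, h2⟩)
    · left; exact_mod_cast h
    · right; exact ⟨by omega, h2⟩

theorem pvBf_trans {a b c : List Int} (h1 : pvBf a b = true) (h2 : pvBf b c = true) : pvBf a c = true := by
  rw [pvBf_iff] at *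
  rcases h1 with h | ⟨e1, l1⟩ <;> rcases h2 with h' | ⟨e2, l2⟩
  · exact Or.inl (h.trans h')
  · exact Or.inl (e2 ▸ h)
  · exact Or.inl (e1 ▸ h')
  · exact Or.inr ⟨e1.trans e2, lt_trans l1 l2⟩

theorem pvBf_asymm {a b : List Int} (h1 : pvBf a b = true) (h2 : pvBf b a = true) : False := by
  rw [pvBf_iff] at *
  rcases h1 with h | ⟨e1, l1⟩ <;> rcases h2 with h' | ⟨e2, l2⟩
  · omega
  · omega
  · omega
  · exact absurd l2 (lt_asymm l1)

theorem pvBf_total {a b : List Int} (h : a ≠ b) : pvBf a b = true ∨ pvBf b a = true := by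
  rw [pvBf_iff, pvBf_iff]
  rcases lt_trichotomy a.length b.length with hl | hl | hl
  · exact Or.inl (Or.inl hl)
  · rcases lt_or_gt_of_ne h with h' | h'
    · exact Or.inl (Or.inr ⟨hl, h'⟩)
    · exact Or.inr (Or.inr ⟨hl.symm, h'⟩)
  · exact Or.inr (Or.inl hl)

theorem pv_insertBy_perm (x : List Int) (l : List (List Int)) :
    (PySem.List.insertBy pvBf x l).Perm (x :: l) := by
  induction l with
  | nil => simp [PySem.List.insertBy]
  | cons y ys ih =>
    simp only [PySem.List.insertBy]
    split
    · exact List.Perm.refl _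
    · exact (ih.cons y).trans (List.Perm.swap x y ys)

theorem pv_pairwise_insertBy {x : List Int} {l : List (List Int)}
    (hp : l.Pairwise (fun a b => pvBf a b = true)) (hx : x ∉ l) :
    (PySem.List.insertBy pvBf x l).Pairwise (fun a b => pvBf a b = true) := by
  induction l with
  | nil => simp [PySem.List.insertBy]
  | cons y ys ih =>
    rcases List.pairwise_cons.mp hp with ⟨hy, hys⟩
    simp only [PySem.List.insertBy]
    split
    · next hxy =>
      refine List.pairwise_cons.mpr ⟨?_, hp⟩
      intro z hz
      rcases hz with _ | hz
      · exact hxy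
      · exact pvBf_trans hxy (hy z (by assumption))
    · next hxy =>
      have hx' : x ∉ ys := fun h => hx (List.mem_cons_of_mem _ h)
      refine List.pairwise_cons.mpr ⟨?_, ih hys hx'⟩
      intro z hz
      rw [PySem.List.mem_insertBy] at hz
      rcases hz with heq | hz
      · rw [heq]
        rcases pvBf_total (fun h : x = y => hx (h ▸ List.mem_cons_self)) with h | h
        · exact absurd h (by simpa using hxy)
        · exact h
      · exact hy z hz

theorem pv_pairwise_foldl (xs : List (List Int)) :
    ∀ acc : List (List Int), acc.Pairwise (fun a b => pvBf a b = true) → acc.Nodup →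
      (∀ a ∈ acc, a ∉ xs) → xs.Nodup →
      (xs.foldl (fun acc x => PySem.List.insertBy pvBf x acc) acc).Pairwise (fun a b => pvBf a b = true) := by
  induction xs with
  | nil => intro acc hp _ _ _; simpa using hp
  | cons x xs ih =>
    intro acc hp hnd hdisj hxs
    have hxacc : x ∉ acc := fun h => hdisj x h List.mem_cons_self
    have hperm := pv_insertBy_perm x acc
    simp only [List.foldl_cons]
    apply ih
    · exact pv_pairwise_insertBy hp hxacc
    · exact hperm.nodup_iff.mpr (List.nodup_cons.mpr ⟨hxacc, hnd⟩)
    · intro a ha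
      rw [PySem.List.mem_insertBy] at ha
      rcases ha with rfl | ha
      · exact (List.nodup_cons.mp hxs).1
      · exact fun h => hdisj a ha (List.mem_cons_of_mem _ h)
    · exact (List.nodup_cons.mp hxs).2

theorem pv_sorted2_eq_bf_fold (s : List (List Int)) :
    PySem.List.sorted2 s (fun x => (x.length : Int)) (fun x => x)
      = s.foldl (fun acc x => PySem.List.insertBy pvBf x acc) [] := by
  simp only [PySem.List.sorted2]
  rfl

theorem pv_foldl_insertBy_perm (s : List (List Int)) :
    (s.foldl (fun acc x => PySem.List.insertBy pvBf x acc) []).Perm s := by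
  have h : ∀ (xs acc : List (List Int)),
      (xs.foldl (fun acc x => PySem.List.insertBy pvBf x acc) acc).Perm (acc ++ xs) := by
    intro xs
    induction xs with
    | nil => intro acc; simp
    | cons x xs ih =>
      intro acc
      simp only [List.foldl_cons]
      refine (ih _).trans ?_
      refine (List.Perm.append_right xs (pv_insertBy_perm x acc)).trans ?_
      exact List.perm_middle.symm
  simpa using h s []

-- the decisive step: sorted2 with the (len, lex) key only depends on the SET of elements
theorem pv_sorted2_congr {s t : List (List Int)} (hs : s.Nodup) (ht : t.Nodup)
    (hmem : ∀ y, y ∈ s ↔ y ∈ t) :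
    PySem.List.sorted2 s (fun x => (x.length : Int)) (fun x => x)
      = PySem.List.sorted2 t (fun x => (x.length : Int)) (fun x => x) := by
  have hst : s.Perm t := (List.perm_ext_iff_of_nodup hs ht).mpr hmem
  rw [pv_sorted2_eq_bf_fold, pv_sorted2_eq_bf_fold]
  have hps := pv_pairwise_foldl s [] (by simp) (by simp) (by simp) hs
  have hpt := pv_pairwise_foldl t [] (by simp) (by simp) (by simp) ht
  refine List.Perm.eq_of_pairwise ?_ hps hpt ?_
  · intro a b _ _ h1 h2; exact (pvBf_asymm h1 h2).elim
  · exact (pv_foldl_insertBy_perm s).trans (hst.trans (pv_foldl_insertBy_perm t).symm)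

-- the heart of the verdict, with the effective max length as a plain Int parameter
theorem pv_main (elements : List Int) (minL maxL : Int)
    (hpre : 0 ≤ minL ∨ maxL < minL) :
    PySem.List.sorted2 (PySem.Set.update PySem.Set.empty
        ((PySem.List.pyRange minL (maxL + 1)).flatMap (fun sz =>
          (PySem.List.combinations elements sz.toNat).flatMap (fun c =>
            (PySem.List.permutations c c.length).map pvCanon))))
      (fun x => (x.length : Int)) (fun x => x)
    = PySem.List.sorted2 (pvLoop minL maxL (min maxL (elements.length : Int)).toNat 0
        [(([] : List Int), elements)] PySem.Set.empty)
      (fun x => (x.length : Int)) (fun x => x) := by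
  apply pv_sorted2_congr
  · exact PySem.Set.nodup_update _ _ List.nodup_nil
  · exact pv_nodup_pvLoop _ _ _ _ _ _ List.nodup_nil
  · intro y
    rw [pv_mem_pvLoop]
    simp only [PySem.Set.mem_update, List.mem_flatMap, PySem.List.mem_pyRange_one]
    constructor
    · rintro (h | ⟨sz, ⟨hsz1, hsz2⟩, hy⟩)
      · simp [PySem.Set.empty] at h
      · rw [pv_memAB] at hy
        simp only [List.mem_map, pv_mem_permutations] at hy
        obtain ⟨p, ⟨hpl, hps⟩, rfl⟩ := hy
        have hsznn : 0 ≤ sz := by omega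
        have hpn : p.length ≤ elements.length := hps.length_le
        refine Or.inr ⟨sz.toNat, by omega, by simp only [zero_add]; omega,
          by simp only [zero_add]; omega, ?_⟩
        exact (pv_frontier_mem elements sz.toNat (pvCanon p)).mpr ⟨p, hpl, hps, rfl⟩
    · rintro (h | ⟨j, _, h1, h2, hmem⟩)
      · exact absurd h (by simp [PySem.Set.empty])
      · obtain ⟨p, hpl, hps, rfl⟩ := (pv_frontier_mem elements j y).mp hmem
        refine Or.inr ⟨(j : Int), ⟨by simpa using h1, by simp only [zero_add] at h2; omega⟩, ?_⟩
        rw [pv_memAB]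
        simp only [List.mem_map, pv_mem_permutations]
        exact ⟨p, ⟨by simp [hpl], hps⟩, rfl⟩

-- the empty case: when no reachable length is admissible, A's set collects nothing
theorem pv_main_empty (elements : List Int) (minL maxL : Int)
    (hlim : min maxL (elements.length : Int) < minL) :
    PySem.List.sorted2 (PySem.Set.update PySem.Set.empty
        ((PySem.List.pyRange minL (maxL + 1)).flatMap (fun sz =>
          (PySem.List.combinations elements sz.toNat).flatMap (fun c =>
            (PySem.List.permutations c c.length).map pvCanon))))
      (fun x => (x.length : Int)) (fun x => x) = [] := by
  have hempty : PySem.Set.update PySem.Set.empty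
      ((PySem.List.pyRange minL (maxL + 1)).flatMap (fun sz =>
        (PySem.List.combinations elements sz.toNat).flatMap (fun c =>
          (PySem.List.permutations c c.length).map pvCanon))) = [] := by
    rw [List.eq_nil_iff_forall_not_mem]
    intro y hy
    simp only [PySem.Set.mem_update, List.mem_flatMap, PySem.List.mem_pyRange_one] at hy
    rcases hy with h | ⟨sz, ⟨hsz1, hsz2⟩, hy⟩
    · simp [PySem.Set.empty] at h
    · rw [pv_memAB] at hy
      simp only [List.mem_map, pv_mem_permutations] at hy
      obtain ⟨p, ⟨hpl, hps⟩, rfl⟩ := hy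
      have hpn : p.length ≤ elements.length := hps.length_le
      omega
  rw [hempty]
  rfl

-- both branches of B's early-exit packaged against A's set
theorem pv_main_all (elements : List Int) (minL maxL : Int)
    (hpre : 0 ≤ minL ∨ maxL < minL) :
    PySem.List.sorted2 (PySem.Set.update PySem.Set.empty
        ((PySem.List.pyRange minL (maxL + 1)).flatMap (fun sz =>
          (PySem.List.combinations elements sz.toNat).flatMap (fun c =>
            (PySem.List.permutations c c.length).map pvCanon))))
      (fun x => (x.length : Int)) (fun x => x)
    = (if min maxL (elements.length : Int) < minL then []
       else PySem.List.sorted2 (pvLoop minL maxL (min maxL (elements.length : Int)).toNat 0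
          [(([] : List Int), elements)] PySem.Set.empty)
        (fun x => (x.length : Int)) (fun x => x)) := by
  split
  · next h => exact pv_main_empty elements minL maxL h
  · exact pv_main elements minL maxL hpre

-- ===== VERDICT (by name: the statement is the Claim_ definition above) =====
theorem all_unique_sequences_spec : Claim_equal_all_unique_sequences := by
  intro elements min_length max_length _ hpre
  show all_unique_sequences elements min_length max_length
      = all_unique_sequences_alt elements min_length max_length
  cases max_length with
  | none =>
    have hpre' : 0 ≤ min_length ∨ (elements.length : Int) < min_length := by
      rcases hpre with h | h
      · exact Or.inl h
      · exact Or.inr (by simpa using h)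
    simp only [all_unique_sequences, all_unique_sequences_alt]
    rw [pv_setA_eq]
    exact pv_main_all elements min_length _ hpre'
  | some m =>
    have hpre' : 0 ≤ min_length ∨ m < min_length := by
      rcases hpre with h | h
      · exact Or.inl h
      · exact Or.inr (by simpa using h)
    simp only [all_unique_sequences, all_unique_sequences_alt]
    rw [pv_setA_eq]
    exact pv_main_all elements min_length _ hpre'
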